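-- pv_equiv track=rewrite | github.com/josh2112/AdventOfCode | 2015/15/solve.py | score_cookie
-- ===== SOURCE A (Python) =====
-- def score_cookie(
--     ings: list[tuple[str, tuple[int, ...]]], amounts: tuple[int, ...]
-- ) -> int:
--     score = 1
--     for p in range(len(ings[0][1])):
--         s = max(sum(ing[1][p] * amounts[i] for i, ing in enumerate(ings)), 0)
--         if s == 0:
--             return 0
--         score *= s
--     return score
-- ===== SOURCE B (Python) =====
-- def score_cookie(
--     ings: list[tuple[str, tuple[int, ...]]], amounts: tuple[int, ...]
-- ) -> int:
--     sums = [0] * len(ings[0][1])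
--     for (_, props), amt in zip(ings, amounts):
--         sums = [s + q * amt for s, q in zip(sums, props)]
--     score = 1
--     for s in sums:
--         score *= max(s, 0)
--     return score
-- ===== Notes on version B (the rewrite author's own statement) =====
-- stated objective: alternative
-- what changed: Transposes the loops: one pass over (ingredient, amount) pairs accumulating a per-property sums vector, then a separate clamp-and-multiply pass, instead of P independent rescans of all ingredients with an early return 0.
-- outside the precondition, e.g. on score_cookie([('a', (-1, 1)), ('b', (1,))], (1, 1)): A returns 0, B returns 0
import Mathlib
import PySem

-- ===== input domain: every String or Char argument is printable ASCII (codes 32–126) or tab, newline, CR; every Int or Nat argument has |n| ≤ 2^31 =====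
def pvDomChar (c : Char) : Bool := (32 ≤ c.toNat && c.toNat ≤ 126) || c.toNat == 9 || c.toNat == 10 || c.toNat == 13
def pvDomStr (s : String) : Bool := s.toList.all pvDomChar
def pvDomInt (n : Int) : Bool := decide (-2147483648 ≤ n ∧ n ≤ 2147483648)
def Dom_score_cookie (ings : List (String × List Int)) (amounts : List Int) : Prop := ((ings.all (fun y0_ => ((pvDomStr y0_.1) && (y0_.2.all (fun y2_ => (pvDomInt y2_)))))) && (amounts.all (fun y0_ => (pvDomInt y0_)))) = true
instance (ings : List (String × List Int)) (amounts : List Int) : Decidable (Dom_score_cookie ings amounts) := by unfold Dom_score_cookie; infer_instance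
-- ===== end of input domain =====

-- B transposes the loops: one accumulate-per-property pass over the ingredients, then clamp-and-multiply; same cost, different decomposition.


-- ===== PORT A =====
-- sum(ing[1][p] * amounts[i] for i, ing in enumerate(ings))  (indexing total via pyGetD; exact under Pre_)
def aInner (ings : List (String × List Int)) (amounts : List Int) (p : Int) : Int :=
  (PySem.List.enumerate ings).foldl
    (fun acc e => acc + (PySem.List.pyGetD e.2.2 p 0) * (PySem.List.pyGetD amounts e.1 0)) 0

-- the 'for p in range(...)' loop with its early 'return 0'
def aLoop (ings : List (String × List Int)) (amounts : List Int) : List Int → Int → Int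
  | [], score => score
  | p :: ps, score =>
    let s := max (aInner ings amounts p) 0
    if s = 0 then 0 else aLoop ings amounts ps (score * s)

def score_cookie (ings : List (String × List Int)) (amounts : List Int) : Int :=
  aLoop ings amounts
    (PySem.List.pyRange 0 (PySem.List.len (PySem.List.pyGetD ings 0 ("", [])).2) 1) 1

-- ===== PORT B =====
-- sums = [s + q * amt for s, q in zip(sums, props)]
def bAddRow (sums props : List Int) (amt : Int) : List Int :=
  (sums.zip props).map (fun q => q.1 + q.2 * amt)

def score_cookie_alt (ings : List (String × List Int)) (amounts : List Int) : Int :=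
  let sums0 : List Int := List.replicate ((PySem.List.pyGetD ings 0 ("", [])).2).length 0
  let sums := (ings.zip amounts).foldl (fun s r => bAddRow s r.1.2 r.2) sums0
  sums.foldl (fun sc v => sc * max v 0) 1

-- ===== PRECONDITION & SPEC =====
-- Pre_ excludes shapes on which the Python programs raise IndexError (empty ings, a
-- property row shorter than the first row, or with properties present fewer amounts than
-- ingredients); A returns on a few such ragged shapes only when its early 'return 0'
-- fires before the out-of-range access — an accident of evaluation order, not claimed.
def Pre_score_cookie (ings : List (String × List Int)) (amounts : List Int) : Prop :=
  ings ≠ [] ∧ (∀ pr ∈ ings, ((ings.headD ("", [])).2).length ≤ pr.2.length) ∧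
    (((ings.headD ("", [])).2).length = 0 ∨ ings.length ≤ amounts.length)
instance (ings : List (String × List Int)) (amounts : List Int) : Decidable (Pre_score_cookie ings amounts) := by unfold Pre_score_cookie; infer_instance

def pvWitness_score_cookie : (List (String × List Int)) × List Int :=
  ([("butter", [2, -1]), ("sugar", [-1, 3])], [3, 2])

def Spec_score_cookie (ings : List (String × List Int)) (amounts : List Int) (out : Int) : Prop := out = score_cookie_alt ings amounts
instance (ings : List (String × List Int)) (amounts : List Int) (out : Int) : Decidable (Spec_score_cookie ings amounts out) := by unfold Spec_score_cookie; infer_instance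

-- ===== CLAIM (what is proved, stated in full; the proofs are below) =====
def Claim_equal_score_cookie : Prop := ∀ (ings : List (String × List Int)) (amounts : List Int), Dom_score_cookie ings amounts → Pre_score_cookie ings amounts → Spec_score_cookie ings amounts (score_cookie ings amounts)

-- ===== LEMMAS AND PROOFS =====
-- the per-property column sum both programs compute
def colSum (rows : List ((String × List Int) × Int)) (k : Nat) : Int :=
  (rows.map (fun r => r.1.2.getD k 0 * r.2)).sum

theorem colSum_cons (r : (String × List Int) × Int) (rows : List ((String × List Int) × Int)) (k : Nat) :
    colSum (r :: rows) k = r.1.2.getD k 0 * r.2 + colSum rows k := by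
  simp [colSum]

-- A's generator-sum over enumerate, with the index resolved against amounts
theorem aInner_enum (p : Int) :
    ∀ (ings : List (String × List Int)) (s : Nat) (pre amounts : List Int) (acc : Int),
      pre.length = s → ings.length ≤ amounts.length →
      (PySem.List.enumerate ings (s : Int)).foldl
          (fun acc e => acc + (PySem.List.pyGetD e.2.2 p 0) * (PySem.List.pyGetD (pre ++ amounts) e.1 0)) acc
        = acc + ((ings.zip amounts).map (fun r => (PySem.List.pyGetD r.1.2 p 0) * r.2)).sum := by
  intro ings
  induction ings with
  | nil => intro s pre amounts acc hs hl; simp [PySem.List.enumerate_nil]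
  | cons ing ings ih =>
    intro s pre amounts acc hs hl
    cases amounts with
    | nil => simp at hl
    | cons a rest =>
      rw [PySem.List.enumerate_cons]
      simp only [List.foldl_cons]
      have h1 : PySem.List.pyGetD (pre ++ a :: rest) (s : Int) 0 = a := by
        rw [PySem.List.pyGetD_natCast]
        simp [List.getD, ← hs]
      have h2 : ((s : Int) + 1) = ((s + 1 : Nat) : Int) := by push_cast; ring
      rw [h1, h2, show pre ++ a :: rest = (pre ++ [a]) ++ rest by simp,
        ih (s + 1) (pre ++ [a]) rest _ (by simp [hs]) (by simpa using hl)]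
      simp only [List.zip_cons_cons, List.map_cons, List.sum_cons]
      ring

theorem aLoop_prod (ings : List (String × List Int)) (amounts : List Int) :
    ∀ (ps : List Int) (score : Int),
      aLoop ings amounts ps score = score * (ps.map (fun p => max (aInner ings amounts p) 0)).prod := by
  intro ps
  induction ps with
  | nil => intro score; simp [aLoop]
  | cons p ps ih =>
    intro score
    simp only [aLoop, List.map_cons, List.prod_cons]
    by_cases h : max (aInner ings amounts p) 0 = 0
    · simp [h]
    · simp [h, ih, mul_assoc]

theorem bAddRow_eq (sums props : List Int) (amt : Int) (h : sums.length ≤ props.length) :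
    bAddRow sums props amt = (List.range sums.length).map (fun k => sums.getD k 0 + props.getD k 0 * amt) := by
  apply List.ext_getElem
  · simp [bAddRow]; omega
  · intro k h1 h2
    have hk : k < sums.length := by simp [bAddRow] at h1; omega
    have hk' : k < props.length := lt_of_lt_of_le hk h
    simp [bAddRow, hk, hk']

theorem bFold_eq :
    ∀ (rows : List ((String × List Int) × Int)) (sums : List Int),
      (∀ r ∈ rows, sums.length ≤ r.1.2.length) →
      rows.foldl (fun s r => bAddRow s r.1.2 r.2) sums
        = (List.range sums.length).map (fun k => sums.getD k 0 + colSum rows k) := by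
  intro rows
  induction rows with
  | nil =>
    intro sums h
    apply List.ext_getElem
    · simp
    · intro k h1 h2
      have hk : k < sums.length := h1
      simp [colSum, hk]
  | cons r rows ih =>
    intro rums h
    simp only [List.foldl_cons]
    have hr : rums.length ≤ r.1.2.length := h r (by simp)
    have hlen : (bAddRow rums r.1.2 r.2).length = rums.length := by
      simp [bAddRow]; omega
    rw [ih _ (by intro q hq; rw [hlen]; exact h q (by simp [hq])), hlen]
    apply List.map_congr_left
    intro k hk
    simp only [List.mem_range] at hk
    rw [bAddRow_eq rums r.1.2 r.2 hr, colSum_cons]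
    rw [List.getD_eq_getElem _ _ (by simpa using hk), List.getElem_map, List.getElem_range]
    rw [List.getD_eq_getElem _ _ hk, List.getD_eq_getElem _ _ (lt_of_lt_of_le hk hr)]
    ring

-- A's inner sum is the column sum, under Pre_'s length condition
theorem aInner_eq_colSum (ings : List (String × List Int)) (amounts : List Int) (k : Nat)
    (hl : ings.length ≤ amounts.length) :
    aInner ings amounts (k : Int) = colSum (ings.zip amounts) k := by
  have := aInner_enum (k : Int) ings 0 [] amounts 0 rfl hl
  simp only [Nat.cast_zero, List.nil_append] at this
  rw [aInner, this, colSum, zero_add]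
  congr 1
  apply List.map_congr_left
  intro r _
  rw [PySem.List.pyGetD_natCast]

-- ===== VERDICT (by name: the statement is the Claim_ definition above) =====
theorem score_cookie_spec : Claim_equal_score_cookie := by
  intro ings amounts _ hpre
  obtain ⟨hne, hrow, hd⟩ := hpre
  cases ings with
  | nil => exact absurd rfl hne
  | cons ing rest =>
    show _ = _
    have hfold : ∀ l : List Int, l.foldl (fun sc v => sc * max v 0) 1
        = (l.map (fun v => max v 0)).prod := fun l => by
      rw [List.prod_eq_foldl, List.foldl_map]
    -- A side: the early-return loop is the product of the clamped column sums
    rw [score_cookie, PySem.List.pyGetD_zero_cons, PySem.List.len_eq, aLoop_prod,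
      PySem.List.pyRange_zero_natCast]
    -- B side: the accumulated sums vector is the vector of column sums
    rw [score_cookie_alt]
    simp only [PySem.List.pyGetD_zero_cons]
    rw [bFold_eq _ _ (by
      intro r hr
      have hmem : r.1 ∈ ing :: rest := (List.of_mem_zip hr).1
      rw [List.length_replicate]
      exact hrow r.1 hmem)]
    simp only [List.length_replicate]
    rw [hfold, List.map_map, List.map_map, one_mul]
    apply congrArg List.prod
    apply List.map_congr_left
    intro k hk
    simp only [List.mem_range] at hk
    simp only [Function.comp_apply]
    have hl : (ing :: rest).length ≤ amounts.length := by
      rcases hd with h0 | hl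
      · simp only [List.headD_cons] at h0; omega
      · exact hl
    rw [aInner_eq_colSum _ _ k hl]
    have hrep : (List.replicate ing.2.length (0 : Int)).getD k 0 = 0 := by
      simp [List.getD, hk]
    rw [hrep, zero_add]
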